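-- pv_equiv track=rewrite | github.com/itpick/warlords2-decompile | tools/analyze_scenario_roads.py | find_road_area
-- ===== SOURCE A (Python) =====
-- def find_road_area(rd_data, width=112, height=156, min_roads=20):
--     """Find a map region with the most road tiles for display."""
--     height = min(height, len(rd_data) // width)
--     best_count = 0
--     best_y = 0
--     best_x = 0
--
--     # Search for 30x30 regions with the most road tiles
--     for sy in range(0, height - 30, 5):
--         for sx in range(0, width - 40, 5):
--             count = 0
--             for y in range(sy, min(sy + 30, height)):
--                 for x in range(sx, min(sx + 40, width)):
--                     if rd_data[y * width + x] != 0: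
--                         count += 1
--             if count > best_count:
--                 best_count = count
--                 best_y = sy
--                 best_x = sx
--
--     return best_x, best_y, best_count
-- ===== SOURCE B (Python) =====
-- def find_road_area(rd_data, width=112, height=156, min_roads=20):
--     """Find a map region with the most road tiles for display."""
--     height = min(height, len(rd_data) // width)
--     if height <= 30 or width <= 40:
--         return 0, 0, 0
--     # 1D prefix sums of road indicators over the flat map: pref[i] = roads in rd_data[:i].
--     pref = [0]
--     for v in rd_data:
--         pref.append(pref[-1] + (1 if v != 0 else 0))
--     # Every candidate window as (count, sy, sx); each of its 30 rows is one prefix difference.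
--     cands = [(sum(pref[y * width + sx + 40] - pref[y * width + sx]
--                   for y in range(sy, sy + 30)), sy, sx)
--              for sy in range(0, height - 30, 5)
--              for sx in range(0, width - 40, 5)]
--     best = max(cands, key=lambda t: t[0])  # first window with the maximal count
--     return best[2], best[1], best[0]
-- ===== Notes on version B (the rewrite author's own statement) =====
-- stated objective: alternative
-- what changed: B builds a flat prefix-sum array of road indicators over the used h*width cells once so each window row is one prefix difference instead of a 40-cell rescan, lists all candidate windows by comprehension, and selects the winner with max(key=count) (first maximal, matching A's strict-improvement update) instead of A's quadruple loop with running-best state.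
import Mathlib
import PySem

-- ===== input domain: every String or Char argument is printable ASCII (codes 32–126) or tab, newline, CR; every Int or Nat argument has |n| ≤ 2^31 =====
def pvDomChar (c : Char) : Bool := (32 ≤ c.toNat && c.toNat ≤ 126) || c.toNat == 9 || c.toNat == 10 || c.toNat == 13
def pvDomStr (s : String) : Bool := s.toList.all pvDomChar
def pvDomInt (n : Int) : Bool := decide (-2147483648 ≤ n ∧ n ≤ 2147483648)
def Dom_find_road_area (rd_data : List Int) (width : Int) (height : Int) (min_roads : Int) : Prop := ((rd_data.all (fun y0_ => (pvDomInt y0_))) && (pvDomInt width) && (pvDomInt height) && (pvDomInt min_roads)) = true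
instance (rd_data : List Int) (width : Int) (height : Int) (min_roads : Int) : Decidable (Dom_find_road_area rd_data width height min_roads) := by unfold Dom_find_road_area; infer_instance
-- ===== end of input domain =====

-- B builds a flat prefix-sum array of road indicators once (each window row is one prefix
-- difference instead of a 40-cell rescan), lists all candidate windows by comprehension and
-- selects the best with max(key=count) — a different algorithm, same return value.

-- ===== PORT A =====
-- Literal port of A. rd_data[y*width+x] is ported with pyGetD; under Pre_ (width ≠ 0) the
-- index is always in range, so the default is never produced (Python never raises there).
def find_road_area (rd_data : List Int) (width : Int) (height : Int) (min_roads : Int) : Int × Int × Int :=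
  let h := min height (PySem.Int.floordiv (rd_data.length : Int) width)
  let st := (PySem.List.pyRange 0 (h - 30) 5).foldl (fun (st : Int × Int × Int) sy =>
      (PySem.List.pyRange 0 (width - 40) 5).foldl (fun (st : Int × Int × Int) sx =>
        let count := (PySem.List.pyRange sy (min (sy + 30) h) 1).foldl (fun (c : Int) y =>
            (PySem.List.pyRange sx (min (sx + 40) width) 1).foldl (fun (c : Int) x =>
              if PySem.List.pyGetD rd_data (y * width + x) 0 ≠ 0 then c + 1 else c) c) 0
        if count > st.1 then (count, sy, sx) else st) st)
    (0, 0, 0)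
  (st.2.2, st.2.1, st.1)

-- ===== PORT B =====
-- Literal port of Source B: prefix list built by appending pref[-1] + indicator, a candidate
-- list built by comprehension (count = sum of 30 prefix differences), then max(key=t[0])
-- via PySem.List.max? (first maximal element, as in Python). The 'none' branch is Python's
-- max-of-empty ValueError; under the guard cands is never empty, so it is unreachable.
def find_road_area_alt (rd_data : List Int) (width : Int) (height : Int) (min_roads : Int) : Int × Int × Int :=
  let h := min height (PySem.Int.floordiv (rd_data.length : Int) width)
  if h ≤ 30 ∨ width ≤ 40 then (0, 0, 0) else
  let pref := rd_data.foldl (fun (p : List Int) v =>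
      p ++ [PySem.List.pyGetD p (-1) 0 + (if v ≠ 0 then (1 : Int) else 0)]) [0]
  let cands := (PySem.List.pyRange 0 (h - 30) 5).flatMap (fun sy =>
      (PySem.List.pyRange 0 (width - 40) 5).map (fun sx =>
        (((PySem.List.pyRange sy (sy + 30) 1).map (fun y =>
            PySem.List.pyGetD pref (y * width + sx + 40) 0
              - PySem.List.pyGetD pref (y * width + sx) 0)).sum, sy, sx)))
  match PySem.List.max? cands (fun t => t.1) with
  | some best => (best.2.2, best.2.1, best.1)
  | none => (0, 0, 0)

-- ===== PRECONDITION & SPEC =====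
-- Pre_ excludes only width = 0, where the Python A raises ZeroDivisionError (len(rd_data) // width).
def Pre_find_road_area (rd_data : List Int) (width : Int) (height : Int) (min_roads : Int) : Prop :=
  width ≠ 0
instance (rd_data : List Int) (width : Int) (height : Int) (min_roads : Int) : Decidable (Pre_find_road_area rd_data width height min_roads) := by unfold Pre_find_road_area; infer_instance

def pvWitness_find_road_area : List Int × Int × Int × Int := ([1, 0, 1], 1, 2, 0)

def Spec_find_road_area (rd_data : List Int) (width : Int) (height : Int) (min_roads : Int) (out : Int × Int × Int) : Prop := out = find_road_area_alt rd_data width height min_roads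
instance (rd_data : List Int) (width : Int) (height : Int) (min_roads : Int) (out : Int × Int × Int) : Decidable (Spec_find_road_area rd_data width height min_roads out) := by unfold Spec_find_road_area; infer_instance

-- ===== CLAIM (what is proved, stated in full; the proofs are below) =====
def Claim_equal_find_road_area : Prop := ∀ (rd_data : List Int) (width : Int) (height : Int) (min_roads : Int), Dom_find_road_area rd_data width height min_roads → Pre_find_road_area rd_data width height min_roads → Spec_find_road_area rd_data width height min_roads (find_road_area rd_data width height min_roads)

-- ===== LEMMAS AND PROOFS =====

-- number of nonzero entries (as an Int) in a list: the quantity both programs count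
def roadS (d : List Int) : Int := (d.map (fun v => if v ≠ 0 then (1 : Int) else 0)).sum

lemma roadS_append (xs ys : List Int) : roadS (xs ++ ys) = roadS xs + roadS ys := by
  simp [roadS]

lemma roadS_take_succ (d : List Int) (m : Nat) (h : m < d.length) :
    roadS (d.take (m + 1)) = roadS (d.take m) + (if d[m] ≠ 0 then (1 : Int) else 0) := by
  rw [List.take_add_one, List.getElem?_eq_getElem h, Option.toList_some, roadS_append]
  simp [roadS]

-- the prefix list B builds, characterised
lemma pref_eq (d : List Int) :
    d.foldl (fun (p : List Int) v =>
        p ++ [PySem.List.pyGetD p (-1) 0 + (if v ≠ 0 then (1 : Int) else 0)]) [0]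
      = (List.range (d.length + 1)).map (fun i => roadS (d.take i)) := by
  induction d using List.reverseRecOn with
  | nil => simp [roadS]
  | append_singleton xs x ih =>
    rw [List.foldl_append, ih, List.foldl_cons, List.foldl_nil]
    have hsplit : (List.range (xs.length + 1)).map (fun i => roadS (xs.take i))
        = (List.range xs.length).map (fun i => roadS (xs.take i)) ++ [roadS xs] := by
      rw [List.range_succ, List.map_append]
      simp
    have hsplit' : (List.range (xs.length + 1)).map (fun i => roadS ((xs ++ [x]).take i))
        = (List.range xs.length).map (fun i => roadS (xs.take i)) ++ [roadS xs] := by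
      rw [List.range_succ, List.map_append]
      congr 1
      · apply List.map_congr_left
        intro i hi
        rw [List.mem_range] at hi
        rw [List.take_append_of_le_length (by omega)]
      · rw [List.map_singleton, List.take_left]
    rw [hsplit, PySem.List.pyGetD_neg_one_append_singleton]
    rw [List.length_append, List.length_singleton, List.range_succ, List.map_append, hsplit']
    have htake : (xs ++ [x]).take (xs.length + 1) = xs ++ [x] := List.take_of_length_le (by simp)
    simp only [List.map_singleton, htake, roadS_append]
    simp [roadS]

lemma pref_get (d : List Int) (i : Int) (h0 : 0 ≤ i) (hL : i ≤ (d.length : Int)) :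
    PySem.List.pyGetD ((List.range (d.length + 1)).map (fun i => roadS (d.take i))) i 0
      = roadS (d.take i.toNat) := by
  rw [PySem.List.pyGetD_eq_getElem _ _ h0 (by simp; omega)]
  rw [List.getElem_map, List.getElem_range]

-- A's inner x-loop over a contiguous index block counts a prefix difference
lemma rowcount (d : List Int) (o : Int) :
    ∀ (k : Nat) (a c : Int), 0 ≤ o + a → o + a + k ≤ (d.length : Int) →
      (PySem.List.pyRange a (a + k) 1).foldl
          (fun (c : Int) x => if PySem.List.pyGetD d (o + x) 0 ≠ 0 then c + 1 else c) c
        = c + roadS (d.take (o + a + k).toNat) - roadS (d.take (o + a).toNat) := by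
  intro k
  induction k with
  | zero =>
    intro a c _ _
    rw [PySem.List.pyRange_one_eq_nil (by omega)]
    simp
  | succ k ih =>
    intro a c h0 hL
    rw [PySem.List.pyRange_one_cons (by omega)]
    simp only [List.foldl_cons]
    have hlt : o + a < (d.length : Int) := by push_cast at hL ⊢; omega
    have hcons : PySem.List.pyRange (a + 1) (a + (k + 1 : Nat)) 1 = PySem.List.pyRange (a + 1) ((a + 1) + (k : Nat)) 1 := by
      congr 1; push_cast; ring
    rw [hcons, ih (a + 1) _ (by omega) (by push_cast at hL ⊢; omega)]
    have hidx : PySem.List.pyGetD d (o + a) 0 = d[(o + a).toNat]'(by omega) :=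
      PySem.List.pyGetD_eq_getElem _ _ h0 hlt
    have hsucc : roadS (d.take ((o + a).toNat + 1))
        = roadS (d.take (o + a).toNat) + (if d[(o + a).toNat]'(by omega) ≠ 0 then (1 : Int) else 0) :=
      roadS_take_succ d _ (by omega)
    have h1 : (o + (a + 1)).toNat = (o + a).toNat + 1 := by omega
    have h2 : (o + (a + 1) + (k : Nat)).toNat = (o + a + ((k : Nat) + 1)).toNat := by push_cast; omega
    rw [h1, h2, hsucc, hidx]
    have h3 : ((((k : Nat) + 1 : Nat)) : Int) = (k : Nat) + 1 := by push_cast; ring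
    rw [h3]
    split <;> ring

-- folding a function that never decreases the accumulator never decreases it
lemma foldl_acc_le {α : Type} (g : Int → α → Int) (hg : ∀ c a, c ≤ g c a) :
    ∀ (l : List α) (c : Int), c ≤ l.foldl g c := by
  intro l
  induction l with
  | nil => intro c; simp
  | cons x t ih => intro c; exact le_trans (hg c x) (ih (g c x))

-- a fold over a flatMap is the nested fold
lemma foldl_flatMap {α β γ : Type} (ls : List α) (f : α → List β) (g : γ → β → γ) :
    ∀ (init : γ), (ls.flatMap f).foldl g init = ls.foldl (fun st a => (f a).foldl g st) init := by
  induction ls with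
  | nil => intro init; simp
  | cons x t ih => intro init; simp only [List.flatMap_cons, List.foldl_append, List.foldl_cons, ih]

lemma flatMap_congr_mem {α β : Type} (l : List α) (f g : α → List β)
    (h : ∀ a ∈ l, f a = g a) : l.flatMap f = l.flatMap g := by
  induction l with
  | nil => rfl
  | cons x t ih =>
    simp only [List.flatMap_cons, h x (List.mem_cons_self), ih (fun a ha => h a (List.mem_cons_of_mem x ha))]

-- a step-5 range from 0 with a positive bound starts at 0
lemma pyRange5_cons (b : Int) (hb : 0 < b) : ∃ r, PySem.List.pyRange 0 b 5 = 0 :: r := by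
  rw [PySem.List.pyRange_of_pos 0 b (by norm_num : (0:Int) < 5), if_pos (by omega)]
  have hb4 : b - 0 + 5 - 1 = b + 4 := by ring
  rw [hb4]
  have hpos : 0 < ((b + 4) / 5).toNat := by
    have h1 : (1 : Int) ≤ (b + 4) / 5 := by
      rw [Int.le_ediv_iff_mul_le (by norm_num : (0:Int) < 5)]
      omega
    omega
  obtain ⟨m, hm⟩ : ∃ m, ((b + 4) / 5).toNat = m + 1 := ⟨((b + 4) / 5).toNat - 1, by omega⟩
  rw [hm, List.range_succ_eq_map, List.map_cons]
  exact ⟨List.map (fun k : Nat => 0 + 5 * (k : Int)) (List.map Nat.succ (List.range m)),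
    by rw [show (0 : Int) + 5 * ((0 : Nat) : Int) = 0 from by norm_num]⟩

-- max? over a nonempty list is the plain keep-the-first-max fold from its head
lemma max?_cons : ∀ (t : List (Int × Int × Int)) (x : Int × Int × Int),
    PySem.List.max? (x :: t) (fun y => y.1)
      = some (t.foldl (fun st y => if y.1 > st.1 then y else st) x) := by
  intro t
  induction t with
  | nil => intro x; rfl
  | cons y s ih =>
    intro x
    have h1 : PySem.List.max? (x :: y :: s) (fun z : Int × Int × Int => z.1)
        = PySem.List.max? ((if x.1 < y.1 then y else x) :: s) (fun z => z.1) := by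
      by_cases hc : x.1 < y.1 <;> simp [PySem.List.max?, hc]
    rw [h1, ih, List.foldl_cons]

-- Python's max(cands, key=t[0]) (first maximal) equals A's keep-the-first-max fold from
-- (0,0,0), provided the first candidate is at (sy,sx)=(0,0) and counts are nonnegative
lemma select_eq (L : List (Int × Int × Int)) (x : Int × Int × Int) (t : List (Int × Int × Int))
    (hL : L = x :: t) (hx1 : 0 ≤ x.1) (hx2 : x.2.1 = 0) (hx3 : x.2.2 = 0) :
    (match PySem.List.max? L (fun y => y.1) with
      | some best => (best.2.2, best.2.1, best.1)
      | none => ((0:Int), (0:Int), (0:Int)))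
    = ((L.foldl (fun st y => if y.1 > st.1 then y else st) (0, 0, 0)).2.2,
       (L.foldl (fun st y => if y.1 > st.1 then y else st) (0, 0, 0)).2.1,
       (L.foldl (fun st y => if y.1 > st.1 then y else st) (0, 0, 0)).1) := by
  subst hL
  have hstep : PySem.List.max? (x :: t) (fun y : Int × Int × Int => y.1)
      = some (t.foldl (fun st y => if y.1 > st.1 then y else st) x) := max?_cons t x
  have hfirst : (x :: t).foldl (fun st y => if y.1 > st.1 then y else st) ((0:Int), (0:Int), (0:Int))
      = t.foldl (fun st y => if y.1 > st.1 then y else st) x := by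
    rw [List.foldl_cons]
    congr 1
    by_cases hc : x.1 > (0:Int)
    · simp [hc]
    · have hx0 : x.1 = 0 := by omega
      have : x = ((0:Int), (0:Int), (0:Int)) := by
        obtain ⟨a, b, c⟩ := x
        simp only at hx0 hx2 hx3
        simp [hx0, hx2, hx3]
      simp [this]
  rw [hstep, hfirst]

-- the main case: when some window fits (h > 30 and width > 40), A's exhaustive search
-- returns exactly B's max?-selected candidate
lemma main_case (d : List Int) (width h : Int)
    (hw : 40 < width) (hh : 30 < h) (hlen : h * width ≤ (d.length : Int)) :
    (let st := (PySem.List.pyRange 0 (h - 30) 5).foldl (fun (st : Int × Int × Int) sy =>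
      (PySem.List.pyRange 0 (width - 40) 5).foldl (fun (st : Int × Int × Int) sx =>
        let count := (PySem.List.pyRange sy (min (sy + 30) h) 1).foldl (fun (c : Int) y =>
            (PySem.List.pyRange sx (min (sx + 40) width) 1).foldl (fun (c : Int) x =>
              if PySem.List.pyGetD d (y * width + x) 0 ≠ 0 then c + 1 else c) c) 0
        if count > st.1 then (count, sy, sx) else st) st) (0, 0, 0)
     (st.2.2, st.2.1, st.1))
    = (match PySem.List.max? ((PySem.List.pyRange 0 (h - 30) 5).flatMap (fun sy =>
          (PySem.List.pyRange 0 (width - 40) 5).map (fun sx =>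
            (((PySem.List.pyRange sy (sy + 30) 1).map (fun y =>
                PySem.List.pyGetD ((List.range (d.length + 1)).map (fun i => roadS (d.take i))) (y * width + sx + 40) 0
                  - PySem.List.pyGetD ((List.range (d.length + 1)).map (fun i => roadS (d.take i))) (y * width + sx) 0)).sum, sy, sx))))
          (fun t => t.1) with
        | some best => (best.2.2, best.2.1, best.1)
        | none => ((0:Int), (0:Int), (0:Int))) := by
  obtain ⟨r1, hr1⟩ := pyRange5_cons (h - 30) (by omega)
  obtain ⟨r2, hr2⟩ := pyRange5_cons (width - 40) (by omega)
  -- A's nested search fold, as a fold over the flattened candidate list (with A's counts)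
  have hA : (PySem.List.pyRange 0 (h - 30) 5).foldl (fun (st : Int × Int × Int) sy =>
      (PySem.List.pyRange 0 (width - 40) 5).foldl (fun (st : Int × Int × Int) sx =>
        let count := (PySem.List.pyRange sy (min (sy + 30) h) 1).foldl (fun (c : Int) y =>
            (PySem.List.pyRange sx (min (sx + 40) width) 1).foldl (fun (c : Int) x =>
              if PySem.List.pyGetD d (y * width + x) 0 ≠ 0 then c + 1 else c) c) 0
        if count > st.1 then (count, sy, sx) else st) st) (0, 0, 0)
    = ((PySem.List.pyRange 0 (h - 30) 5).flatMap (fun sy =>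
        (PySem.List.pyRange 0 (width - 40) 5).map (fun sx =>
          ((PySem.List.pyRange sy (min (sy + 30) h) 1).foldl (fun (c : Int) y =>
            (PySem.List.pyRange sx (min (sx + 40) width) 1).foldl (fun (c : Int) x =>
              if PySem.List.pyGetD d (y * width + x) 0 ≠ 0 then c + 1 else c) c) 0, sy, sx)))).foldl
        (fun st y => if y.1 > st.1 then y else st) (0, 0, 0) := by
    rw [foldl_flatMap]
    apply PySem.List.foldl_congr_mem
    intro st sy _
    rw [List.foldl_map]
  -- A's count of a fitting window equals B's sum of 30 prefix differences
  have hcount : ∀ sy ∈ PySem.List.pyRange 0 (h - 30) 5, ∀ sx ∈ PySem.List.pyRange 0 (width - 40) 5,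
      (PySem.List.pyRange sy (min (sy + 30) h) 1).foldl (fun (c : Int) y =>
        (PySem.List.pyRange sx (min (sx + 40) width) 1).foldl (fun (c : Int) x =>
          if PySem.List.pyGetD d (y * width + x) 0 ≠ 0 then c + 1 else c) c) 0
      = ((PySem.List.pyRange sy (sy + 30) 1).map (fun y =>
          PySem.List.pyGetD ((List.range (d.length + 1)).map (fun i => roadS (d.take i))) (y * width + sx + 40) 0
            - PySem.List.pyGetD ((List.range (d.length + 1)).map (fun i => roadS (d.take i))) (y * width + sx) 0)).sum := by
    intro sy hsy sx hsx
    rw [PySem.List.mem_pyRange_iff_of_pos (by norm_num)] at hsy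
    obtain ⟨hsy0, hsy1, -⟩ := hsy
    rw [PySem.List.mem_pyRange_iff_of_pos (by norm_num)] at hsx
    obtain ⟨hsx0, hsx1, -⟩ := hsx
    rw [min_eq_left (show sx + 40 ≤ width by omega), min_eq_left (show sy + 30 ≤ h by omega)]
    have hstep : (PySem.List.pyRange sy (sy + 30) 1).foldl (fun (c : Int) y =>
        (PySem.List.pyRange sx (sx + 40) 1).foldl (fun (c : Int) x =>
          if PySem.List.pyGetD d (y * width + x) 0 ≠ 0 then c + 1 else c) c) 0
      = (PySem.List.pyRange sy (sy + 30) 1).foldl (fun (c : Int) y =>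
          c + (PySem.List.pyGetD ((List.range (d.length + 1)).map (fun i => roadS (d.take i))) (y * width + sx + 40) 0
             - PySem.List.pyGetD ((List.range (d.length + 1)).map (fun i => roadS (d.take i))) (y * width + sx) 0)) 0 := by
      apply PySem.List.foldl_congr_mem
      intro c y hy
      rw [PySem.List.mem_pyRange_one] at hy
      obtain ⟨hy0, hy1⟩ := hy
      have hy0' : 0 ≤ y := le_trans hsy0 hy0
      have hyw0 : 0 ≤ y * width := mul_nonneg hy0' (by omega)
      have hyw1 : (y + 1) * width ≤ h * width :=
        mul_le_mul_of_nonneg_right (by omega) (by omega)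
      have hub : y * width + sx + 40 ≤ (d.length : Int) := by nlinarith
      have h40 : sx + 40 = sx + ((40 : Nat) : Int) := by norm_num
      rw [h40, rowcount d (y * width) 40 sx c (by omega) (by push_cast; omega)]
      rw [pref_get d _ (by omega) (by push_cast; omega),
          pref_get d _ (by omega) (by push_cast; omega)]
      have : y * width + sx + ((40 : Nat) : Int) = y * width + sx + 40 := by norm_num
      rw [this]
      ring
    rw [hstep, PySem.List.foldl_add]
    ring
  -- the candidate list with A's counts equals B's candidate list
  have hcands : (PySem.List.pyRange 0 (h - 30) 5).flatMap (fun sy =>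
        (PySem.List.pyRange 0 (width - 40) 5).map (fun sx =>
          ((PySem.List.pyRange sy (min (sy + 30) h) 1).foldl (fun (c : Int) y =>
            (PySem.List.pyRange sx (min (sx + 40) width) 1).foldl (fun (c : Int) x =>
              if PySem.List.pyGetD d (y * width + x) 0 ≠ 0 then c + 1 else c) c) 0, sy, sx)))
      = (PySem.List.pyRange 0 (h - 30) 5).flatMap (fun sy =>
        (PySem.List.pyRange 0 (width - 40) 5).map (fun sx =>
          (((PySem.List.pyRange sy (sy + 30) 1).map (fun y =>
              PySem.List.pyGetD ((List.range (d.length + 1)).map (fun i => roadS (d.take i))) (y * width + sx + 40) 0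
                - PySem.List.pyGetD ((List.range (d.length + 1)).map (fun i => roadS (d.take i))) (y * width + sx) 0)).sum, sy, sx))) := by
    apply flatMap_congr_mem
    intro sy hsy
    apply List.map_congr_left
    intro sx hsx
    rw [hcount sy hsy sx hsx]
  -- every candidate count is nonnegative
  have hnn : ∀ t ∈ (PySem.List.pyRange 0 (h - 30) 5).flatMap (fun sy =>
        (PySem.List.pyRange 0 (width - 40) 5).map (fun sx =>
          ((PySem.List.pyRange sy (min (sy + 30) h) 1).foldl (fun (c : Int) y =>
            (PySem.List.pyRange sx (min (sx + 40) width) 1).foldl (fun (c : Int) x =>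
              if PySem.List.pyGetD d (y * width + x) 0 ≠ 0 then c + 1 else c) c) 0, sy, sx))),
      0 ≤ t.1 := by
    intro t ht
    rw [List.mem_flatMap] at ht
    obtain ⟨sy, -, ht⟩ := ht
    rw [List.mem_map] at ht
    obtain ⟨sx, -, rfl⟩ := ht
    exact foldl_acc_le _ (fun c y => foldl_acc_le _ (fun c x => by split <;> omega) _ c) _ 0
  -- the candidate list starts with the window at (sy, sx) = (0, 0)
  have hhead : (PySem.List.pyRange 0 (h - 30) 5).flatMap (fun sy =>
        (PySem.List.pyRange 0 (width - 40) 5).map (fun sx =>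
          ((PySem.List.pyRange sy (min (sy + 30) h) 1).foldl (fun (c : Int) y =>
            (PySem.List.pyRange sx (min (sx + 40) width) 1).foldl (fun (c : Int) x =>
              if PySem.List.pyGetD d (y * width + x) 0 ≠ 0 then c + 1 else c) c) 0, sy, sx)))
      = ((PySem.List.pyRange 0 (min (0 + 30) h) 1).foldl (fun (c : Int) y =>
            (PySem.List.pyRange 0 (min (0 + 40) width) 1).foldl (fun (c : Int) x =>
              if PySem.List.pyGetD d (y * width + x) 0 ≠ 0 then c + 1 else c) c) 0, (0:Int), (0:Int))
        :: (r2.map (fun sx =>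
          ((PySem.List.pyRange 0 (min (0 + 30) h) 1).foldl (fun (c : Int) y =>
            (PySem.List.pyRange sx (min (sx + 40) width) 1).foldl (fun (c : Int) x =>
              if PySem.List.pyGetD d (y * width + x) 0 ≠ 0 then c + 1 else c) c) 0, (0:Int), sx))
          ++ r1.flatMap (fun sy =>
            (PySem.List.pyRange 0 (width - 40) 5).map (fun sx =>
              ((PySem.List.pyRange sy (min (sy + 30) h) 1).foldl (fun (c : Int) y =>
                (PySem.List.pyRange sx (min (sx + 40) width) 1).foldl (fun (c : Int) x =>
                  if PySem.List.pyGetD d (y * width + x) 0 ≠ 0 then c + 1 else c) c) 0, sy, sx)))) := by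
    rw [hr1, List.flatMap_cons, hr2, List.map_cons, List.cons_append]
  rw [hA, hcands] at *
  rw [hcands] at hhead hnn
  exact (select_eq _ _ _ hhead (hnn _ (hhead ▸ List.mem_cons_self)) rfl rfl).symm

-- ===== VERDICT (by name: the statement is the Claim_ definition above) =====
theorem find_road_area_spec : Claim_equal_find_road_area := by
  intro rd_data width height min_roads _ hpre
  unfold Spec_find_road_area find_road_area find_road_area_alt
  simp only
  set h := min height (PySem.Int.floordiv (rd_data.length : Int) width) with hh
  by_cases hg : h ≤ 30 ∨ width ≤ 40
  · -- no window fits: both return (0,0,0)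
    rw [if_pos hg]
    rcases hg with hg | hg
    · rw [PySem.List.pyRange_of_pos 0 (h - 30) (by norm_num : (0:Int) < 5),
        if_neg (by omega)]
      simp
    · rw [PySem.List.pyRange_of_pos 0 (width - 40) (by norm_num : (0:Int) < 5),
        if_neg (by omega)]
      simp [List.foldl_fixed]
  · rw [if_neg hg]
    push_neg at hg
    obtain ⟨h30, h40⟩ := hg
    have hwpos : (0 : Int) < width := by omega
    have hfd : PySem.Int.floordiv (rd_data.length : Int) width = (rd_data.length : Int) / width :=
      PySem.Int.floordiv_eq_ediv_of_pos hwpos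
    have hlen : h * width ≤ (rd_data.length : Int) := by
      have h1 : h ≤ (rd_data.length : Int) / width := by rw [hh, hfd]; exact min_le_right _ _
      calc h * width ≤ ((rd_data.length : Int) / width) * width :=
            mul_le_mul_of_nonneg_right h1 (by omega)
        _ ≤ (rd_data.length : Int) := Int.ediv_mul_le _ (by omega)
    rw [pref_eq rd_data]
    exact main_case rd_data width h h40 h30 hlen
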